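-- pv_equiv track=rewrite | github.com/Visin-8386/NHANDIENCHU | src/data/segmentation.py | reconstruct_text_from_predictions
-- ===== SOURCE A (Python) =====
-- from typing import List, Tuple, Optional
--
-- def reconstruct_text_from_predictions(predictions: List[str],
--                                        metadata: List[dict]) -> str:
--     """
--     Reconstruct full text from word predictions maintaining line structure
--
--     Args:
--         predictions: List of predicted words
--         metadata: Metadata from prepare_batch_for_recognition
--
--     Returns:
--         Full reconstructed text with newlines between lines
--     """
--     if not predictions or not metadata:
--         return ""
--
--     # Group by line
--     lines = {}
--     for pred, meta in zip(predictions, metadata):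
--         line_idx = meta['line_idx']
--         word_idx = meta['word_idx']
--
--         if line_idx not in lines:
--             lines[line_idx] = []
--         lines[line_idx].append((word_idx, pred))
--
--     # Sort and join
--     result_lines = []
--     for line_idx in sorted(lines.keys()):
--         words = lines[line_idx]
--         words.sort(key=lambda x: x[0])  # Sort by word index
--         line_text = ' '.join([w[1] for w in words])
--         result_lines.append(line_text)
--
--     return '\n'.join(result_lines)
-- ===== SOURCE B (Python) =====
-- def reconstruct_text_from_predictions(predictions, metadata):
--     if not predictions or not metadata:
--         return ""
--     pairs = list(zip(predictions, metadata))
--     line_ids = sorted({m['line_idx'] for _, m in pairs})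
--     lines = [
--         ' '.join(w for _, w in sorted(
--             ((m['word_idx'], p) for p, m in pairs if m['line_idx'] == li),
--             key=lambda x: x[0]))
--         for li in line_ids
--     ]
--     return '\n'.join(lines)
-- ===== Notes on version B (the rewrite author's own statement) =====
-- stated objective: alternative
-- what changed: B replaces A's mutable dict accumulation (group into a dict of per-line lists, then sort keys and sort each bucket) by computing the sorted distinct line indices up front and building each line directly from a filtered, sorted pass over the zipped (prediction, metadata) pairs.
import Mathlib
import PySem

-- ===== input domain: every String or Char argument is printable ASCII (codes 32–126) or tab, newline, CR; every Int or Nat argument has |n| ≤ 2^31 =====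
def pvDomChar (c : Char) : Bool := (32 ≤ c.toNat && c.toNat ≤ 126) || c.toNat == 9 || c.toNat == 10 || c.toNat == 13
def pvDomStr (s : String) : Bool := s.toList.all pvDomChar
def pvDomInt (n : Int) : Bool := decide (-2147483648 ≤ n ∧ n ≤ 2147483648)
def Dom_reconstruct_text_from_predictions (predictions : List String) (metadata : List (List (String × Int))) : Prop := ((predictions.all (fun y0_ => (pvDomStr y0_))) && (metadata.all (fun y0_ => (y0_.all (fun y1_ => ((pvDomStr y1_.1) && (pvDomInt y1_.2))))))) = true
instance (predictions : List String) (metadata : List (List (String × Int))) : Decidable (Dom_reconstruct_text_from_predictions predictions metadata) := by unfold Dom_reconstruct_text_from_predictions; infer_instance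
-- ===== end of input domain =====

-- B computes the sorted distinct line indices first and builds each line by a filtered, sorted
-- pass over the zipped pairs, instead of A's dict-of-buckets accumulation (alternative decomposition).

-- ===== PORT A =====
def reconstruct_text_from_predictions (predictions : List String) (metadata : List (List (String × Int))) : String :=
  if predictions = [] || metadata = [] then "" else
    let lines : PySem.Dict Int (List (Int × String)) :=
      (predictions.zip metadata).foldl (fun d pm =>
        d.modify ((List.lookup "line_idx" pm.2).getD 0) []
          (fun ws => ws ++ [((List.lookup "word_idx" pm.2).getD 0, pm.1)])) PySem.Dict.empty
    let result_lines : List String :=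
      (PySem.List.sorted lines.keys (fun x => x) false).foldl (fun acc li =>
        acc ++ [PySem.Str.join " "
          ((PySem.List.sorted (lines.getD li []) (fun w => w.1) false).map (fun w => w.2))]) []
    PySem.Str.join "\n" result_lines

-- ===== PORT B =====
def reconstruct_text_from_predictions_alt (predictions : List String) (metadata : List (List (String × Int))) : String :=
  if predictions = [] || metadata = [] then "" else
    let pairs := predictions.zip metadata
    let line_ids := PySem.List.sorted
      (PySem.Set.ofList (pairs.map (fun pm => (List.lookup "line_idx" pm.2).getD 0))) (fun x => x) false
    let lines := line_ids.map (fun li =>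
      PySem.Str.join " "
        ((PySem.List.sorted
            ((pairs.filter (fun pm => (List.lookup "line_idx" pm.2).getD 0 == li)).map
              (fun pm => ((List.lookup "word_idx" pm.2).getD 0, pm.1)))
            (fun w => w.1) false).map (fun w => w.2)))
    PySem.Str.join "\n" lines

-- ===== PRECONDITION & SPEC =====
-- Pre_ excludes exactly the inputs on which Python A raises KeyError: some metadata dict that is
-- actually consumed by zip lacks the key 'line_idx' or 'word_idx' (B raises there as well).
def Pre_reconstruct_text_from_predictions (predictions : List String) (metadata : List (List (String × Int))) : Prop :=
  ∀ pm ∈ predictions.zip metadata,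
    (List.lookup "line_idx" pm.2).isSome = true ∧ (List.lookup "word_idx" pm.2).isSome = true
instance (predictions : List String) (metadata : List (List (String × Int))) : Decidable (Pre_reconstruct_text_from_predictions predictions metadata) := by unfold Pre_reconstruct_text_from_predictions; infer_instance
def pvWitness_reconstruct_text_from_predictions : List String × (List (List (String × Int))) :=
  (["hi", "yo"], [[("line_idx", 0), ("word_idx", 1)], [("line_idx", 0), ("word_idx", 0)]])
def Spec_reconstruct_text_from_predictions (predictions : List String) (metadata : List (List (String × Int))) (out : String) : Prop := out = reconstruct_text_from_predictions_alt predictions metadata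
instance (predictions : List String) (metadata : List (List (String × Int))) (out : String) : Decidable (Spec_reconstruct_text_from_predictions predictions metadata out) := by unfold Spec_reconstruct_text_from_predictions; infer_instance

-- ===== CLAIM (what is proved, stated in full; the proofs are below) =====
def Claim_equal_reconstruct_text_from_predictions : Prop := ∀ (predictions : List String) (metadata : List (List (String × Int))), Dom_reconstruct_text_from_predictions predictions metadata → Pre_reconstruct_text_from_predictions predictions metadata → Spec_reconstruct_text_from_predictions predictions metadata (reconstruct_text_from_predictions predictions metadata)

-- ===== LEMMAS AND PROOFS =====

-- A's dict bucket at key li is exactly the filtered-and-projected list of zipped pairs.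
theorem pv_bucket_eq_filter (pairs : List (String × List (String × Int)))
    (d : PySem.Dict Int (List (Int × String))) (li : Int) :
    (pairs.foldl (fun d pm =>
        d.modify ((List.lookup "line_idx" pm.2).getD 0) []
          (fun ws => ws ++ [((List.lookup "word_idx" pm.2).getD 0, pm.1)])) d).getD li []
    = d.getD li [] ++
      ((pairs.filter (fun pm => (List.lookup "line_idx" pm.2).getD 0 == li)).map
        (fun pm => ((List.lookup "word_idx" pm.2).getD 0, pm.1))) := by
  induction pairs generalizing d with
  | nil => simp
  | cons pm ps ih =>
    simp only [List.foldl_cons, List.filter_cons]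
    rw [ih]
    rw [PySem.Dict.getD_modify]
    by_cases h : (List.lookup "line_idx" pm.2).getD 0 = li
    · simp [h, List.append_assoc]
    · have h' : ¬ li = (List.lookup "line_idx" pm.2).getD 0 := fun he => h he.symm
      simp [h, h']

theorem pv_main (predictions : List String) (metadata : List (List (String × Int))) :
    reconstruct_text_from_predictions predictions metadata
      = reconstruct_text_from_predictions_alt predictions metadata := by
  unfold reconstruct_text_from_predictions reconstruct_text_from_predictions_alt
  by_cases hg : (predictions = [] || metadata = []) = true
  · simp [hg]
  · simp only [hg, if_neg, Bool.false_eq_true, not_false_eq_true]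
    rw [PySem.List.foldl_append_singleton_eq_map]
    rw [PySem.Dict.keys_foldl_modify_key
        (predictions.zip metadata) (fun pm => (List.lookup "line_idx" pm.2).getD 0)]
    rw [PySem.Dict.keys_empty, PySem.Set.update_nil_left]
    simp only [pv_bucket_eq_filter, PySem.Dict.getD_empty, List.nil_append]

-- ===== VERDICT (by name: the statement is the Claim_ definition above) =====
theorem reconstruct_text_from_predictions_spec : Claim_equal_reconstruct_text_from_predictions := by
  intro predictions metadata _ _
  exact pv_main predictions metadata
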